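-- pv_equiv track=rewrite | github.com/SereneLian/ClinicalAge | run_ehr_age_inference.py | index_seg
-- ===== SOURCE A (Python) =====
-- def index_seg(tokens, symbol='SEP'):
--     flag = 0
--     seg = []
--     for token in tokens:
--         if token == symbol:
--             seg.append(flag)
--             flag = 1 - flag
--         else:
--             seg.append(flag)
--     return seg
-- ===== SOURCE B (Python) =====
-- def index_seg(tokens, symbol='SEP'):
--     # indicator per token, prefix-count of SEPs strictly before each position, then parity
--     ind = [1 if t == symbol else 0 for t in tokens]
--     pref = [0] * len(ind)
--     c = 0
--     for i in range(len(ind)):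
--         pref[i] = c
--         c += ind[i]
--     return [p % 2 for p in pref]
-- ===== Notes on version B (the rewrite author's own statement) =====
-- stated objective: alternative
-- what changed: Replaces the inline toggle state machine with a build-then-map decomposition: an indicator list, a prefix-count table of separators strictly before each position, then a parity map.
import Mathlib
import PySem

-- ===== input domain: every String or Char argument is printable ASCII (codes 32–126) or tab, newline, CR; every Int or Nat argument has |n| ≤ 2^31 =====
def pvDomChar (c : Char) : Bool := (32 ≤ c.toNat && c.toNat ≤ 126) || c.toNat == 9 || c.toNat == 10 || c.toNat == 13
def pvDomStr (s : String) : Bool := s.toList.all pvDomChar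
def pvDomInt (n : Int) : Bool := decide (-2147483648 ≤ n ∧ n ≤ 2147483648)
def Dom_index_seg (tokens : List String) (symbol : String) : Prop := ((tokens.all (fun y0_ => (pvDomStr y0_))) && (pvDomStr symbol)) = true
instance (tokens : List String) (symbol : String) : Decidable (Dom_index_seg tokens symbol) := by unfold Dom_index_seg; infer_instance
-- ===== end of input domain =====

-- B replaces A's inline toggle state machine with an indicator list, a prefix-count table, and a parity map (alternative decomposition, same O(n) cost).


-- ===== PORT A =====
-- A's loop: carry the toggle flag, append it for every token, flip it after a separator.
def indexSegGo (symbol : String) (flag : Int) : List String → List Int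
  | [] => []
  | t :: ts => if t == symbol then flag :: indexSegGo symbol (1 - flag) ts
               else flag :: indexSegGo symbol flag ts

def index_seg (tokens : List String) (symbol : String) : List Int :=
  indexSegGo symbol 0 tokens

-- ===== PORT B =====
-- B's prefix loop: position i gets the running count of indicators strictly before it.
def prefCounts (c : Int) : List Int → List Int
  | [] => []
  | x :: xs => c :: prefCounts (c + x) xs

def index_seg_alt (tokens : List String) (symbol : String) : List Int :=
  let ind := tokens.map (fun t => if t == symbol then (1 : Int) else 0)
  (prefCounts 0 ind).map (fun p => p % 2)

-- ===== PRECONDITION & SPEC =====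
def Spec_index_seg (tokens : List String) (symbol : String) (out : List Int) : Prop := out = index_seg_alt tokens symbol
instance (tokens : List String) (symbol : String) (out : List Int) : Decidable (Spec_index_seg tokens symbol out) := by unfold Spec_index_seg; infer_instance

-- ===== CLAIM (what is proved, stated in full; the proofs are below) =====
def Claim_equal_index_seg : Prop := ∀ (tokens : List String) (symbol : String), Dom_index_seg tokens symbol → Spec_index_seg tokens symbol (index_seg tokens symbol)

-- ===== LEMMAS AND PROOFS =====
theorem indexSegGo_eq_pref (symbol : String) (ts : List String) :
    ∀ c : Int, 0 ≤ c →
      indexSegGo symbol (c % 2) ts =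
        (prefCounts c (ts.map (fun t => if t == symbol then (1 : Int) else 0))).map (fun p => p % 2) := by
  induction ts with
  | nil => intro c _; simp [indexSegGo, prefCounts]
  | cons t ts ih =>
    intro c hc
    by_cases h : t = symbol
    · have h1 : (1 : Int) - c % 2 = (c + 1) % 2 := by omega
      subst h
      simp [indexSegGo, prefCounts, h1, ih (c + 1) (by omega)]
    · simp [indexSegGo, prefCounts, h, ih c hc]

-- ===== VERDICT (by name: the statement is the Claim_ definition above) =====
theorem index_seg_spec : Claim_equal_index_seg := by
  intro tokens symbol _
  unfold Spec_index_seg index_seg index_seg_alt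
  have := indexSegGo_eq_pref symbol tokens 0 (by omega)
  simpa using this
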